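-- pv_equiv track=rewrite | github.com/TommasoBianchi/CFR-Jr | games/goofspiel.py | goofspiel_utility
-- ===== SOURCE A (Python) =====
-- def goofspiel_utility(hand, moves):
--     """
--     Get the utility of a Goofspiel game given the hand and how the players have played.
--     """
--
--     num_players = len(moves)
--     u = [0] * num_players
--     additional_utility = 0
--
--     for i in range(len(hand)):
--         round_moves = [moves[p][i] for p in range(num_players)]
--         winner = winner_player(round_moves)
--
--         if(winner == -1):
--             additional_utility += hand[i]
--         else:
--             u[winner] += hand[i] + additional_utility
--             additional_utility = 0
--
--     return u
--
-- def winner_player(round_moves):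
--     """
--     Calculate the winner player given the cards that were played in a round.
--     """
--
--     moves_dict = {}
--     for p in range(len(round_moves)):
--         move = round_moves[p]
--         if(move in moves_dict):
--             moves_dict[move].append(p)
--         else:
--             moves_dict[move] = [p]
--
--     single_moves = list(filter(lambda el: len(el[1]) == 1, moves_dict.items()))
--
--     if(len(single_moves) == 0):
--         return -1
--
--     winner = max(single_moves, key = lambda el: el[0])[1][0]
--
--     return winner
-- ===== SOURCE B (Python) =====
-- def goofspiel_utility(hand, moves):
--     """
--     Get the utility of a Goofspiel game given the hand and how the players have played.
--     Winner of a round found by sorting the played cards descending and scanning for the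
--     first card whose value is not shared with a neighbour (i.e. is unique in the round).
--     """
--     num_players = len(moves)
--     u = [0] * num_players
--     carry = 0
--     for i, card in enumerate(hand):
--         pairs = sorted(((m[i], p) for p, m in enumerate(moves)),
--                        key=lambda t: t[0], reverse=True)
--         winner = -1
--         prev = None
--         for k in range(len(pairs)):
--             v, p = pairs[k]
--             nxt = pairs[k + 1][0] if k + 1 < len(pairs) else None
--             if v != prev and v != nxt:
--                 winner = p
--                 break
--             prev = v
--         if winner == -1:
--             carry += card
--         else:
--             u[winner] += card + carry
--             carry = 0
--     return u
-- ===== Notes on version B (the rewrite author's own statement) =====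
-- stated objective: alternative
-- what changed: The per-round winner search (dict grouping values to player lists, filtering singletons, then max by value) is replaced by sorting the round's (card, player) pairs descending by card and scanning for the first card that differs from both sorted neighbours, i.e. the highest unique card.
import Mathlib
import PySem

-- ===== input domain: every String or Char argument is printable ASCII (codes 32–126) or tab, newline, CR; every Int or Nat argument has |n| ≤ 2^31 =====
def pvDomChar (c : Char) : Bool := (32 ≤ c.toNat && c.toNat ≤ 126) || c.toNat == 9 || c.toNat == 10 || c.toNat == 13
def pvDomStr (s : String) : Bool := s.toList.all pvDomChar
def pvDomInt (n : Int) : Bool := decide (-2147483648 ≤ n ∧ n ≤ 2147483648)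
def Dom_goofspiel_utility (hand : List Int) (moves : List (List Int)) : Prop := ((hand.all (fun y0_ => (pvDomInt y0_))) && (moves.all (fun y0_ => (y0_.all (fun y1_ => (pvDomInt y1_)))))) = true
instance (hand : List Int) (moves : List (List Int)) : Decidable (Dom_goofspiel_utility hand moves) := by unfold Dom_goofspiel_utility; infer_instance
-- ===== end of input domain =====

-- B replaces A's per-round dict-grouping + filter + max winner search by a sort-then-scan
-- (sort the round's cards descending, return the player of the first card not shared with a
-- neighbour); objective: alternative algorithm, same observable behaviour.

-- ===== PORT A =====
-- winner_player: group player indices by move value in a dict, keep the single-occurrence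
-- values, take the (unique) player of the largest such value.
def pvWinnerA (round_moves : List Int) : Int :=
  let moves_dict : PySem.Dict Int (List Int) :=
    (PySem.List.pyRange 0 (round_moves.length : Int)).foldl (fun d p =>
      let move := PySem.List.pyGetD round_moves p 0   -- p ∈ range(len), in range: exact
      if d.contains move then
        d.modify move [] (fun l => l ++ [p])          -- moves_dict[move].append(p)
      else
        d.insert move [p]) PySem.Dict.empty
  let single_moves := moves_dict.items.filter (fun el => el.2.length == 1)
  if single_moves.length == 0 then -1
  else
    match PySem.List.max? single_moves (fun el => el.1) with
    | some m => PySem.List.pyGetD m.2 0 0             -- max(...)[1][0]; the list has length 1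
    | none => -1                                      -- unreachable: single_moves ≠ []

def goofspiel_utility (hand : List Int) (moves : List (List Int)) : List Int :=
  let num_players : Int := (moves.length : Int)
  let u : List Int := PySem.List.pyRepeat [0] num_players
  -- state (u, additional_utility); hand[i] and moves[p] are always in range;
  -- moves[p][i] is in range exactly on Pre_ (the getD default is never read there)
  let res := (PySem.List.pyRange 0 (hand.length : Int)).foldl (fun (st : List Int × Int) i =>
    let round_moves := (PySem.List.pyRange 0 num_players).map
      (fun p => PySem.List.pyGetD (PySem.List.pyGetD moves p []) i 0)
    let winner := pvWinnerA round_moves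
    if winner == -1 then
      (st.1, st.2 + PySem.List.pyGetD hand i 0)
    else
      -- u[winner] += hand[i] + additional_utility; 0 ≤ winner < len(u) here, so set/toNat is exact
      (st.1.set winner.toNat (PySem.List.pyGetD st.1 winner 0 + PySem.List.pyGetD hand i 0 + st.2), 0))
    (u, 0)
  res.1

-- ===== PORT B =====
-- walk the descending-sorted round with prev = previous card value (none at the start);
-- return the first player whose card differs from both neighbours
def pvScanB (prev : Option Int) : List (Int × Int) → Int
  | [] => -1
  | (v, p) :: rest =>
    let nxt := rest.head?.map (fun e => e.1)          -- pairs[k+1][0] if k+1 < len(pairs) else None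
    if some v ≠ prev ∧ some v ≠ nxt then p
    else pvScanB (some v) rest

def pvRoundWinnerB (pairs : List (Int × Int)) : Int :=
  pvScanB none (PySem.List.sorted pairs (fun t => t.1) true)

def goofspiel_utility_alt (hand : List Int) (moves : List (List Int)) : List Int :=
  let num_players : Int := (moves.length : Int)
  let u : List Int := PySem.List.pyRepeat [0] num_players
  -- state (u, carry); m[i] is in range exactly on Pre_ (the getD default is never read there)
  let res := (PySem.List.enumerate hand).foldl (fun (st : List Int × Int) ic =>
    let pairs := (PySem.List.enumerate moves).map
      (fun pm => (PySem.List.pyGetD pm.2 ic.1 0, pm.1))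
    let winner := pvRoundWinnerB pairs
    if winner == -1 then
      (st.1, st.2 + ic.2)
    else
      (st.1.set winner.toNat (PySem.List.pyGetD st.1 winner 0 + ic.2 + st.2), 0))
    (u, 0)
  res.1

-- ===== PRECONDITION & SPEC =====
-- Pre_ excludes exactly the inputs where the Python A raises IndexError (some player's move
-- list is shorter than the hand, so moves[p][i] is evaluated out of range); B raises there too.
def Pre_goofspiel_utility (hand : List Int) (moves : List (List Int)) : Prop :=
  ∀ m ∈ moves, hand.length ≤ m.length
instance (hand : List Int) (moves : List (List Int)) : Decidable (Pre_goofspiel_utility hand moves) := by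
  unfold Pre_goofspiel_utility; infer_instance

def pvWitness_goofspiel_utility : List Int × List (List Int) :=
  ([3, 1, 2], [[2, 0, 1], [2, 1, 0], [0, 1, 2]])

def Spec_goofspiel_utility (hand : List Int) (moves : List (List Int)) (out : List Int) : Prop :=
  out = goofspiel_utility_alt hand moves
instance (hand : List Int) (moves : List (List Int)) (out : List Int) : Decidable (Spec_goofspiel_utility hand moves out) := by
  unfold Spec_goofspiel_utility; infer_instance

-- ===== CLAIM (what is proved, stated in full; the proofs are below) =====
def Claim_equal_goofspiel_utility : Prop := ∀ (hand : List Int) (moves : List (List Int)), Dom_goofspiel_utility hand moves → Pre_goofspiel_utility hand moves → Spec_goofspiel_utility hand moves (goofspiel_utility hand moves)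

-- ===== LEMMAS AND PROOFS =====

-- the characterisation both round-winner computations satisfy: -1 when no card value is
-- unique in the round, else the position of the unique occurrence of the largest unique value
def pvWinnerIs (r : List Int) (w : Int) : Prop :=
  (w = -1 ∧ ∀ v ∈ r, r.count v ≠ 1) ∨
  (∃ k : Nat, w = (k : Int) ∧ k < r.length ∧ r.count (r.getD k 0) = 1 ∧
      ∀ v ∈ r, r.count v = 1 → v ≤ r.getD k 0)

-- the indices (as Python ints) at which r carries value v, in increasing order
def pvOcc (r : List Int) (v : Int) : List Int :=
  (PySem.List.pyRange 0 (r.length : Int)).filter (fun p => PySem.List.pyGetD r p 0 == v)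

lemma pvTwoIdx_le_count (r : List Int) (i j : Nat) (hij : i < j) (hj : j < r.length)
    (v : Int) (h1 : r.getD i 0 = v) (h2 : r.getD j 0 = v) : 2 ≤ r.count v := by
  have hi : i < r.length := lt_trans hij hj
  rw [List.getD_eq_getElem _ _ hi] at h1
  rw [List.getD_eq_getElem _ _ hj] at h2
  have hc : r.count v = (r.take j).count v + (r.drop j).count v := by
    conv_lhs => rw [← List.take_append_drop j r]
    exact List.count_append ..
  have hm1 : v ∈ r.take j := by
    have h : (r.take j)[i]'(by simp [hj.le]; omega) = v := by
      simpa [List.getElem_take] using h1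
    exact h ▸ List.getElem_mem _
  have hm2 : v ∈ r.drop j := by
    have h : (r.drop j)[0]'(by simp; omega) = v := by
      simpa [List.getElem_drop] using h2
    exact h ▸ List.getElem_mem _
  have c1 : 0 < (r.take j).count v := List.count_pos_iff.mpr hm1
  have c2 : 0 < (r.drop j).count v := List.count_pos_iff.mpr hm2
  omega

lemma pvCnt (r : List Int) (v : Int) :
    ((List.range r.length).filter (fun k => r.getD k 0 == v)).length = r.count v := by
  induction r with
  | nil => simp
  | cons a t ih =>
    simp only [List.length_cons, List.range_succ_eq_map, List.filter_cons, List.filter_map,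
      List.getD_cons_zero, List.count_cons]
    by_cases h : a = v <;> simp [h, Function.comp_def, ← ih]

lemma pvWinnerIs_unique {r : List Int} {w1 w2 : Int}
    (h1 : pvWinnerIs r w1) (h2 : pvWinnerIs r w2) : w1 = w2 := by
  rcases h1 with ⟨e1, hn1⟩ | ⟨k1, e1, hk1, hc1, hm1⟩ <;>
    rcases h2 with ⟨e2, hn2⟩ | ⟨k2, e2, hk2, hc2, hm2⟩
  · rw [e1, e2]
  · exact absurd hc2 (hn1 _ (List.getD_eq_getElem _ _ hk2 ▸ List.getElem_mem _))
  · exact absurd hc1 (hn2 _ (List.getD_eq_getElem _ _ hk1 ▸ List.getElem_mem _))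
  · have m1 : r.getD k1 0 ∈ r := List.getD_eq_getElem _ _ hk1 ▸ List.getElem_mem _
    have m2 : r.getD k2 0 ∈ r := List.getD_eq_getElem _ _ hk2 ▸ List.getElem_mem _
    have hv : r.getD k1 0 = r.getD k2 0 :=
      le_antisymm (hm2 _ m1 hc1) (hm1 _ m2 hc2)
    have hk : k1 = k2 := by
      by_contra hne
      rcases Nat.lt_or_ge k1 k2 with h | h
      · have := pvTwoIdx_le_count r k1 k2 h hk2 _ hv rfl
        omega
      · have := pvTwoIdx_le_count r k2 k1 (by omega) hk1 _ hv.symm rfl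
        omega
    rw [e1, e2, hk]

lemma pvOcc_eq (r : List Int) (v : Int) :
    pvOcc r v = ((List.range r.length).filter (fun k => r.getD k 0 == v)).map (fun (k : Nat) => (k : Int)) := by
  rw [pvOcc, PySem.List.pyRange_zero_natCast, List.filter_map]
  exact congrArg (List.map _) (List.filter_congr (by intro k _; simp [Function.comp, PySem.List.pyGetD_natCast]))

lemma pvOcc_length (r : List Int) (v : Int) : (pvOcc r v).length = r.count v := by
  simp only [pvOcc_eq, List.length_map, pvCnt]

lemma pvOcc_single (r : List Int) (v : Int) (h : (pvOcc r v).length = 1) :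
    ∃ k : Nat, pvOcc r v = [(k : Int)] ∧ k < r.length ∧ r.getD k 0 = v := by
  rw [pvOcc_eq] at h ⊢
  rcases hF : (List.range r.length).filter (fun k => r.getD k 0 == v) with _ | ⟨k, tl⟩
  · rw [hF] at h; simp at h
  · rw [hF] at h
    simp only [List.length_map] at h
    have htl : tl = [] := List.length_eq_zero_iff.mp (by simpa using h)
    subst htl
    refine ⟨k, by simp, ?_, ?_⟩
    · have : k ∈ (List.range r.length).filter (fun k => r.getD k 0 == v) := by
        rw [hF]; simp
      simpa using (List.mem_filter.mp this).1
    · have : k ∈ (List.range r.length).filter (fun k => r.getD k 0 == v) := by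
        rw [hF]; simp
      simpa using (List.mem_filter.mp this).2

lemma pvEnum {α : Type} (xs : List α) (d : α) :
    ∀ m : Nat, PySem.List.enumerate xs (m : Int) =
      (List.range xs.length).map (fun k => (((m + k : Nat) : Int), xs.getD k d)) := by
  induction xs with
  | nil => intro m; simp [PySem.List.enumerate]
  | cons x t ih =>
    intro m
    show (↑m, x) :: PySem.List.enumerate t (↑m + 1) = _
    have : ((m : Int) + 1) = ((m + 1 : Nat) : Int) := by push_cast; ring
    rw [this, ih (m + 1)]
    simp only [List.length_cons, List.range_succ_eq_map, List.map_cons, List.map_map]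
    refine congrArg₂ List.cons (by simp) ?_
    apply List.map_congr_left
    intro k hk
    simp only [Function.comp_apply, List.getD_cons_succ]
    congr 1
    omega

lemma pvDictA (r : List Int) :
    ((PySem.List.pyRange 0 (r.length : Int)).foldl (fun d p =>
        let move := PySem.List.pyGetD r p 0
        if d.contains move then d.modify move [] (fun l => l ++ [p])
        else d.insert move [p]) PySem.Dict.empty).items
      = (PySem.Set.ofList r).map (fun v => (v, pvOcc r v)) := by
  have hstep : ∀ (d : PySem.Dict Int (List Int)) (p : Int),
      (let move := PySem.List.pyGetD r p 0
       if d.contains move then d.modify move [] (fun l => l ++ [p])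
       else d.insert move [p]) = d.modify (PySem.List.pyGetD r p 0) [] (fun l => l ++ [p]) := by
    intro d p
    by_cases hc : d.contains (PySem.List.pyGetD r p 0)
    · simp [hc]
    · simp only [Bool.not_eq_true] at hc
      simp [hc, PySem.Dict.modify, PySem.Dict.getD_of_not_contains d [] hc]
  rw [show (fun (d : PySem.Dict Int (List Int)) (p : Int) =>
        let move := PySem.List.pyGetD r p 0
        if d.contains move then d.modify move [] (fun l => l ++ [p])
        else d.insert move [p]) = fun d p => d.modify (PySem.List.pyGetD r p 0) [] (fun l => l ++ [p])
      from funext fun d => funext fun p => hstep d p]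
  have hkeys : ((PySem.List.pyRange 0 (r.length : Int)).foldl
      (fun d p => d.modify (PySem.List.pyGetD r p 0) [] (fun l => l ++ [p])) PySem.Dict.empty).keys
      = PySem.Set.ofList r := by
    rw [PySem.Dict.keys_foldl_modify_key _ (fun p => PySem.List.pyGetD r p 0) []
      (fun _ p => fun l => l ++ [p]) PySem.Dict.empty]
    rw [PySem.Dict.keys_empty]
    have : (PySem.List.pyRange 0 (r.length : Int)).map (fun p => PySem.List.pyGetD r p 0) = r :=
      PySem.List.map_pyGetD_pyRange_zero r 0
    rw [this]
    rfl
  have hnodup : ((PySem.List.pyRange 0 (r.length : Int)).foldl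
      (fun d p => d.modify (PySem.List.pyGetD r p 0) [] (fun l => l ++ [p])) PySem.Dict.empty).keys.Nodup := by
    exact PySem.Dict.nodup_keys_foldl_modify_key _ (fun p => PySem.List.pyGetD r p 0) []
      (fun _ p => fun l => l ++ [p]) PySem.Dict.empty PySem.Dict.nodup_keys_empty
  have hgetD : ∀ v, ((PySem.List.pyRange 0 (r.length : Int)).foldl
      (fun d p => d.modify (PySem.List.pyGetD r p 0) [] (fun l => l ++ [p])) PySem.Dict.empty).getD v []
      = pvOcc r v := by
    intro v
    have hfm : (PySem.List.pyRange 0 (r.length : Int)).foldl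
        (fun d p => d.modify (PySem.List.pyGetD r p 0) [] (fun l => l ++ [p])) PySem.Dict.empty
        = ((PySem.List.pyRange 0 (r.length : Int)).map (fun p => (PySem.List.pyGetD r p 0, p))).foldl
          (fun d q => d.modify q.1 [] (fun l => l ++ [q.2])) PySem.Dict.empty := by
      rw [List.foldl_map]
    rw [hfm, PySem.Dict.getD_foldl_modify_append, PySem.Dict.getD_empty, List.filter_map,
      List.map_map, pvOcc]
    simp [Function.comp_def]
  rw [PySem.Dict.items_eq_map_keys _ hnodup [], hkeys]
  exact List.map_congr_left fun v _ => by rw [hgetD v]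

lemma pvA_sat (r : List Int) : pvWinnerIs r (pvWinnerA r) := by
  unfold pvWinnerA
  simp only [pvDictA r, List.filter_map]
  have hcomp : ((fun el : Int × List Int => el.2.length == 1) ∘ (fun v => (v, pvOcc r v)))
      = fun v => (pvOcc r v).length == 1 := rfl
  rw [hcomp]
  rcases hF : (PySem.Set.ofList r).filter (fun v => (pvOcc r v).length == 1) with _ | ⟨w, tl⟩
  · simp only [List.map_nil, List.length_nil]
    norm_num
    left
    refine ⟨rfl, fun v hv hc => ?_⟩
    have hvS : v ∈ (PySem.Set.ofList r : List Int) := (PySem.Set.mem_ofList r v).mpr hv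
    have := List.filter_eq_nil_iff.mp hF v hvS
    rw [pvOcc_length] at this
    simp [hc] at this
  · have hne : ((w :: tl).map (fun v => (v, pvOcc r v))).length ≠ 0 := by simp
    simp only [beq_iff_eq, hne]
    rcases hmax : PySem.List.max? ((w :: tl).map (fun v => (v, pvOcc r v))) (fun el => el.1) with _ | m
    · rw [PySem.List.max?_eq_none_iff] at hmax
      simp at hmax
    · have hmem := PySem.List.max?_mem hmax
      rcases List.mem_map.mp hmem with ⟨v, hvF, hvm⟩
      have hvfilter : v ∈ (PySem.Set.ofList r).filter (fun v => (pvOcc r v).length == 1) := by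
        rw [hF]; exact hvF
      have hv1 : (pvOcc r v).length = 1 := by
        simpa using (List.mem_filter.mp hvfilter).2
      obtain ⟨k, hocc, hk, hval⟩ := pvOcc_single r v hv1
      have hret : PySem.List.pyGetD m.2 0 0 = (k : Int) := by
        rw [← hvm]
        simp [hocc, PySem.List.pyGetD_ofNat']
      right
      refine ⟨k, hret, hk, ?_, ?_⟩
      · rw [hval, ← pvOcc_length, hv1]
      · intro v' hv' hc'
        have hv'1 : (pvOcc r v').length = 1 := by rw [pvOcc_length, hc']
        have hv'F : (v', pvOcc r v') ∈ (w :: tl).map (fun v => (v, pvOcc r v)) := by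
          rw [← hF]
          exact List.mem_map_of_mem (List.mem_filter.mpr
            ⟨(PySem.Set.mem_ofList r v').mpr hv', by simp [hv'1]⟩)
        have := PySem.List.max?_isMax hmax _ hv'F
        rw [hval, ← hvm] at *
        simpa using this

lemma pvScan_winnerIs (r : List Int) (L : List (Int × Int)) :
    ∀ (Lp : List (Int × Int)),
    ((Lp ++ L).map (fun e => e.1)).Perm r →
    (Lp ++ L).Pairwise (fun a b => b.1 ≤ a.1) →
    (∀ e ∈ Lp ++ L, ∃ k : Nat, e.2 = (k : Int) ∧ k < r.length ∧ r.getD k 0 = e.1) →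
    (∀ e ∈ Lp, r.count e.1 ≠ 1) →
    pvWinnerIs r (pvScanB ((Lp.getLast?).map (fun e => e.1)) L) := by
  induction L with
  | nil =>
    intro Lp hperm hpw hvalid hskip
    rw [List.append_nil] at hperm
    left
    refine ⟨rfl, fun v hv => ?_⟩
    rcases List.mem_map.mp (hperm.mem_iff.mpr hv) with ⟨e, he, hev⟩
    exact hev ▸ hskip e he
  | cons hd rest ih =>
    intro Lp hperm hpw hvalid hskip
    obtain ⟨v, p⟩ := hd
    show pvWinnerIs r (if some v ≠ (Lp.getLast?).map (fun e => e.1) ∧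
        some v ≠ rest.head?.map (fun e => e.1) then p else pvScanB (some v) rest)
    -- count of v decomposes over Lp ++ (v,p)::rest
    have hcnt : r.count v = (Lp.map (fun e => e.1)).count v + 1 + (rest.map (fun e => e.1)).count v := by
      rw [← hperm.count_eq v]
      simp [List.count_append]
      omega
    by_cases hcond : some v ≠ (Lp.getLast?).map (fun e => e.1) ∧ some v ≠ rest.head?.map (fun e => e.1)
    · rw [if_pos hcond]
      obtain ⟨hprev, hnxt⟩ := hcond
      obtain ⟨k, hpk, hk, hval⟩ := hvalid (v, p) (by simp)
      have cLp : (Lp.map (fun e => e.1)).count v = 0 := by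
        by_contra hne
        have hvm : v ∈ Lp.map (fun e => e.1) := by
          have := Nat.pos_of_ne_zero hne
          exact List.count_pos_iff.mp this
        rcases List.mem_map.mp hvm with ⟨e, heLp, hev⟩
        rcases List.eq_nil_or_concat' Lp with hnil | ⟨L', a, hLa⟩
        · rw [hnil] at heLp; simp at heLp
        · subst hLa
          have hlast : ((L' ++ [a]).getLast?).map (fun e => e.1) = some a.1 := by
            rw [List.getLast?_concat]; rfl
          -- cross inequalities from pairwise
          have hpw1 := (List.pairwise_append.mp hpw)
          have hcross : ∀ x ∈ L' ++ [a], v ≤ x.1 := fun x hx => hpw1.2.2 x hx (v, p) (by simp)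
          have hpwLp := hpw1.1
          have hcross2 : ∀ x ∈ L', a.1 ≤ x.1 := fun x hx =>
            (List.pairwise_append.mp hpwLp).2.2 x hx a (by simp)
          rcases List.mem_append.mp heLp with heL' | hea
          · have h1 : a.1 ≤ e.1 := hcross2 e heL'
            have h2 : v ≤ a.1 := hcross a (by simp)
            have : a.1 = v := le_antisymm (hev ▸ h1) h2
            exact hprev (by rw [hlast, this])
          · have : e = a := by simpa using hea
            exact hprev (by rw [hlast, ← this, hev])
      have cRest : (rest.map (fun e => e.1)).count v = 0 := by
        by_contra hne
        have hvm : v ∈ rest.map (fun e => e.1) :=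
          List.count_pos_iff.mp (Nat.pos_of_ne_zero hne)
        rcases List.mem_map.mp hvm with ⟨e, heR, hev⟩
        rcases rest with _ | ⟨hd', rest'⟩
        · simp at heR
        · have hpw2 := List.pairwise_append.mp hpw
          have hpwc := hpw2.2.1   -- Pairwise on (v,p)::hd'::rest'
          have hhd : hd'.1 ≤ v := by
            have := List.pairwise_cons.mp hpwc
            exact this.1 hd' (by simp)
          rcases List.mem_cons.mp heR with hehd | herest'
          · exact hnxt (by simp only [List.head?_cons, Option.map_some]; rw [← hev, hehd])
          · have h1 : e.1 ≤ hd'.1 := by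
              have := List.pairwise_cons.mp ((List.pairwise_cons.mp hpwc).2)
              exact this.1 e herest'
            have : hd'.1 = v := le_antisymm hhd (by rw [← hev]; exact h1)
            exact hnxt (by simp [this])
      right
      refine ⟨k, hpk, hk, ?_, ?_⟩
      · rw [hval, hcnt, cLp, cRest]
      · intro v' hv' hc'
        rw [hval]
        have hvm : v' ∈ (Lp ++ (v, p) :: rest).map (fun e => e.1) := hperm.mem_iff.mpr hv'
        rcases List.mem_map.mp hvm with ⟨e, he, hev⟩
        rcases List.mem_append.mp he with heLp | hecons
        · exact absurd hc' (hev ▸ hskip e heLp)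
        · rcases List.mem_cons.mp hecons with heq | herest
          · rw [← hev, heq]
          · have := (List.pairwise_append.mp hpw).2.1
            have h1 : e.1 ≤ v := (List.pairwise_cons.mp this).1 e herest
            exact hev ▸ h1
    · rw [if_neg hcond]
      have hv2 : r.count v ≠ 1 := by
        rcases not_and_or.mp hcond with h | h
        · simp only [ne_eq, not_not] at h
          rcases List.eq_nil_or_concat' Lp with hnil | ⟨L', a, hLa⟩
          · rw [hnil] at h; simp at h
          · subst hLa
            rw [List.getLast?_concat] at h
            have ha1 : a.1 = v := by
              simp only [Option.map_some] at h
              exact (Option.some.inj h).symm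
            have hvm : v ∈ (L' ++ [a]).map (fun e => e.1) := List.mem_map.mpr ⟨a, by simp, ha1⟩
            have := List.count_pos_iff.mpr hvm
            omega
        · simp only [ne_eq, not_not] at h
          rcases rest with _ | ⟨hd', rest'⟩
          · simp at h
          · have hh1 : hd'.1 = v := by
              simp only [List.head?_cons, Option.map_some] at h
              exact (Option.some.inj h).symm
            have hvm : v ∈ (hd' :: rest').map (fun e => e.1) := List.mem_map.mpr ⟨hd', by simp, hh1⟩
            have := List.count_pos_iff.mpr hvm
            omega
      have hassoc : (Lp ++ [(v, p)]) ++ rest = Lp ++ (v, p) :: rest := by simp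
      have hres := ih (Lp ++ [(v, p)]) (by rw [hassoc]; exact hperm) (by rw [hassoc]; exact hpw)
        (by rw [hassoc]; exact hvalid)
        (fun e he => by
          rcases List.mem_append.mp he with h1 | h2
          · exact hskip e h1
          · have : e = (v, p) := by simpa using h2
            rw [this]; exact hv2)
      simpa [List.getLast?_concat] using hres

lemma pvB_sat (n : Nat) (g : Nat → Int) :
    pvWinnerIs ((List.range n).map g)
      (pvRoundWinnerB ((List.range n).map (fun q => (g q, (q : Int))))) := by
  set r := (List.range n).map g with hr
  set pairs := (List.range n).map (fun q => (g q, (q : Int))) with hpairs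
  have h := pvScan_winnerIs r (PySem.List.sorted pairs (fun t => t.1) true) []
  simp only [List.nil_append, List.getLast?_nil, Option.map_none] at h
  apply h
  · have h1 := (PySem.List.sorted_perm pairs (fun t => t.1) true).map (fun e => e.1)
    have h2 : pairs.map (fun e : Int × Int => e.1) = r := by
      rw [hpairs, List.map_map]; rfl
    rw [h2] at h1; exact h1
  · exact PySem.List.sorted_pairwise_rev pairs (fun t => t.1)
  · intro e he
    have hmem : e ∈ pairs := (PySem.List.sorted_perm pairs (fun t => t.1) true).mem_iff.mp he
    rcases List.mem_map.mp hmem with ⟨q, hq, hqe⟩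
    have hqn : q < n := List.mem_range.mp hq
    refine ⟨q, by rw [← hqe], by simp [hr, hqn], ?_⟩
    rw [← hqe]
    rw [List.getD_eq_getElem _ _ (by simp [hr, hqn])]
    simp [hr]
  · intro e he; simp at he

lemma pvWinner_eq (n : Nat) (g : Nat → Int) :
    pvWinnerA ((List.range n).map g) = pvRoundWinnerB ((List.range n).map (fun q => (g q, (q : Int)))) :=
  pvWinnerIs_unique (pvA_sat _) (pvB_sat n g)

-- ===== VERDICT (by name: the statement is the Claim_ definition above) =====
theorem goofspiel_utility_spec : Claim_equal_goofspiel_utility := by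
  intro hand moves _ _
  unfold Spec_goofspiel_utility goofspiel_utility goofspiel_utility_alt
  have henum_hand : PySem.List.enumerate hand =
      (List.range hand.length).map (fun (k : Nat) => ((k : Int), hand.getD k 0)) := by
    simpa using pvEnum hand 0 0
  have henum_moves : PySem.List.enumerate moves =
      (List.range moves.length).map (fun (q : Nat) => ((q : Int), moves.getD q [])) := by
    simpa using pvEnum moves [] 0
  simp only [henum_hand, henum_moves, PySem.List.pyRange_zero_natCast, List.foldl_map,
    List.map_map, Function.comp_def, PySem.List.pyGetD_natCast]
  congr 2
  funext st k
  rw [pvWinner_eq moves.length (fun q => (moves.getD q []).getD k 0)]
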